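-- pv_equiv track=rewrite | github.com/ooaventur/aventuroo | scripts/check_links.py | sanitize_url
-- ===== SOURCE A (Python) =====
-- def sanitize_url(raw: str) -> str:
--     url = raw.strip()
--     if not url:
--         return ""
--     for sep in ("#", "?"):
--         if sep in url:
--             url = url.split(sep, 1)[0]
--     return url.strip()
-- ===== SOURCE B (Python) =====
-- def sanitize_url(raw: str) -> str:
--     out = []
--     for c in raw.strip():
--         if c in "#?":
--             break
--         out.append(c)
--     return "".join(out).strip()
-- ===== Notes on version B (the rewrite author's own statement) =====
-- stated objective: simpler
-- what changed: B replaces A's two sequential conditional split-truncations (one per separator) by a single left-to-right pass that collects characters until the first hash or question-mark and breaks, then strips once.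
import Mathlib
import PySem

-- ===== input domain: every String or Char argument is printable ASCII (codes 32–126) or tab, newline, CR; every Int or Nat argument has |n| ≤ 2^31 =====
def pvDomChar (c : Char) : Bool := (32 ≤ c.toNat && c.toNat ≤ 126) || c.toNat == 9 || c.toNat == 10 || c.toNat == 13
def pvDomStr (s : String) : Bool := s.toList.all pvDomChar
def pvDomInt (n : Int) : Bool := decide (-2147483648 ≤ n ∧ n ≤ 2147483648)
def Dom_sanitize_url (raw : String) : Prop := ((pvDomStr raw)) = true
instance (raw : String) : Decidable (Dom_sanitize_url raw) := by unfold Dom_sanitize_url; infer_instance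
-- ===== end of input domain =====

-- B replaces A's two sequential conditional split-truncations by a single
-- left-to-right pass that stops at the first '#' or '?' (objective: simpler).

-- ===== PORT A =====
-- A: url = raw.strip(); if not url: return ""; for sep in ("#","?"): if sep in url: url = url.split(sep,1)[0]; return url.strip()
def sanitize_url (raw : String) : String :=
  let url := PySem.Str.strip raw
  if url = "" then ""
  else
    let url2 := ["#", "?"].foldl (fun u sep =>
      if PySem.Str.isIn sep u then
        -- url.split(sep, 1)[0]; the list is always nonempty, so the default is never used
        PySem.List.pyGetD ((PySem.Str.splitMax? u sep 1).getD []) 0 u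
      else u) url
    PySem.Str.strip url2

-- ===== PORT B =====
-- loop of Source B: collect characters until the first one in "#?" (break)
def sanitizeLoop (acc : List Char) : List Char → List Char
  | [] => acc
  | c :: rest =>
      if ("#?".toList).contains c then acc
      else sanitizeLoop (acc ++ [c]) rest

-- B: out = []; for c in raw.strip(): if c in "#?": break; out.append(c); return "".join(out).strip()
-- ("".join of a list of single characters is String.ofList)
def sanitize_url_alt (raw : String) : String :=
  PySem.Str.strip (String.ofList (sanitizeLoop [] (PySem.Str.strip raw).toList))

-- ===== PRECONDITION & SPEC =====
def Spec_sanitize_url (raw : String) (out : String) : Prop := out = sanitize_url_alt raw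
instance (raw : String) (out : String) : Decidable (Spec_sanitize_url raw out) := by unfold Spec_sanitize_url; infer_instance

-- ===== CLAIM (what is proved, stated in full; the proofs are below) =====
def Claim_equal_sanitize_url : Prop := ∀ (raw : String), Dom_sanitize_url raw → Spec_sanitize_url raw (sanitize_url raw)

-- ===== LEMMAS AND PROOFS =====

-- the fuelled split loop with maxsplit 0 just returns the rest
lemma go_zero (sep : List Char) (n : ℕ) (l cur : List Char) (acc : List (List Char)) :
    PySem.Chars.splitOnMax.go sep (n+1) 0 l cur acc = ((cur.reverse ++ l) :: acc).reverse := by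
  cases l <;> simp [PySem.Chars.splitOnMax.go]

-- the fuelled split loop with maxsplit 1 and a single-char separator
lemma go_split_one (c : Char) : ∀ (fuel : ℕ) (s cur : List Char) (acc : List (List Char)),
    s.length < fuel →
    PySem.Chars.splitOnMax.go [c] fuel 1 s cur acc =
      if c ∈ s then
        ((s.dropWhile (· != c)).tail :: (cur.reverse ++ s.takeWhile (· != c)) :: acc).reverse
      else ((cur.reverse ++ s) :: acc).reverse := by
  intro fuel
  induction fuel with
  | zero => intro s cur acc h; omega
  | succ n ih =>
    intro s cur acc h
    cases s with
    | nil => simp [PySem.Chars.splitOnMax.go]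
    | cons d rest =>
      by_cases hdc : c = d
      · subst hdc
        cases n with
        | zero => simp at h
        | succ m =>
          rw [show PySem.Chars.splitOnMax.go [c] (m+1+1) 1 (c :: rest) cur acc
                = PySem.Chars.splitOnMax.go [c] (m+1) 0 rest [] (cur.reverse :: acc) from by
              simp [PySem.Chars.splitOnMax.go, List.isPrefixOf]]
          rw [go_zero]
          simp [bne]
      · rw [show PySem.Chars.splitOnMax.go [c] (n+1) 1 (d :: rest) cur acc
              = PySem.Chars.splitOnMax.go [c] n 1 rest (d :: cur) acc from by
            simp [PySem.Chars.splitOnMax.go, List.isPrefixOf, hdc]]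
        have hne : (d != c) = true := by
          simp [bne]; intro h'; exact hdc h'.symm
        rw [ih rest (d :: cur) acc (by simpa using Nat.lt_of_succ_lt_succ h)]
        have hter : c ∈ d :: rest ↔ c ∈ rest := by
          simp [List.mem_cons, hdc]
        by_cases hm : c ∈ rest
        · simp [hm, hter.mpr hm, hne]
        · have hnm : ¬ c ∈ d :: rest := fun h' => hm (hter.mp h')
          simp [hm, hnm]

-- one pass of A's for-loop body equals a takeWhile at the character level
lemma stepA_toList (u : String) (sep : String) (c : Char) (hs : sep.toList = [c]) :
    (if PySem.Str.isIn sep u then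
        PySem.List.pyGetD ((PySem.Str.splitMax? u sep 1).getD []) 0 u
      else u).toList = u.toList.takeWhile (· != c) := by
  by_cases hIn : PySem.Str.isIn sep u = true
  · have hmem : c ∈ u.toList := by
      rw [PySem.Str.isIn_eq, hs, PySem.Chars.isIn_iff_infix] at hIn
      exact (List.singleton_infix_iff c u.toList).mp hIn
    rw [if_pos hIn]
    have hsplit : PySem.Chars.splitOnMax u.toList [c] 1 =
        [u.toList.takeWhile (· != c), (u.toList.dropWhile (· != c)).tail] := by
      unfold PySem.Chars.splitOnMax
      rw [if_neg (by omega)]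
      have := go_split_one c (u.toList.length + 1) u.toList [] [] (by omega)
      rw [show (1 : ℤ).toNat = 1 from rfl, this, if_pos hmem]
      simp
    simp only [PySem.Str.splitMax?, PySem.Chars.splitMax?, hs, hsplit]
    simp [PySem.List.pyGetD, PySem.List.pyGet?, PySem.List.pyIdx?]
  · have hmem : ¬ c ∈ u.toList := by
      intro h
      apply hIn
      rw [PySem.Str.isIn_eq, hs, PySem.Chars.isIn_iff_infix]
      exact (List.singleton_infix_iff c u.toList).mpr h
    rw [if_neg hIn]
    symm
    apply List.takeWhile_eq_self_iff.mpr
    intro x hx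
    simp [bne]
    intro h'; exact hmem (h' ▸ hx)

-- B's loop is a takeWhile with the collected prefix in front
lemma sanitizeLoop_eq : ∀ (s acc : List Char),
    sanitizeLoop acc s = acc ++ s.takeWhile (fun c => !(("#?".toList).contains c)) := by
  intro s
  induction s with
  | nil => intro acc; simp [sanitizeLoop]
  | cons c rest ih =>
    intro acc
    by_cases hp : c = '#' ∨ c = '?'
    · simp [sanitizeLoop, List.takeWhile_cons]
      rw [if_pos hp, if_neg (by tauto)]
      simp
    · have h1 : ¬ c = '#' := fun h' => hp (Or.inl h')
      have h2 : ¬ c = '?' := fun h' => hp (Or.inr h')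
      simp [sanitizeLoop, List.takeWhile_cons, ih]
      rw [if_neg hp, if_pos (show ¬c = '#' ∧ ¬c = '?' from ⟨h1, h2⟩)]

-- the two character predicates agree pointwise
lemma predChar (c : Char) : ((c != '?') && (c != '#')) = !(("#?".toList).contains c) := by
  by_cases h1 : c = '#'
  · subst h1; decide
  · by_cases h2 : c = '?'
    · subst h2; decide
    · have c1 : (c != '#') = true := by simpa [bne] using h1
      have c2 : (c != '?') = true := by simpa [bne] using h2
      have c3 : (("#?".toList).contains c) = false := by
        simp [List.contains_eq_mem]; exact ⟨h1, h2⟩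
      rw [c1, c2, c3]; rfl

-- ===== VERDICT (by name: the statement is the Claim_ definition above) =====
theorem sanitize_url_spec : Claim_equal_sanitize_url := by
  intro raw _
  unfold Spec_sanitize_url sanitize_url sanitize_url_alt
  by_cases h : PySem.Str.strip raw = ""
  · rw [if_pos h, h]; rfl
  · rw [if_neg h]
    apply String.toList_inj.mp
    rw [PySem.Str.toList_strip, PySem.Str.toList_strip]
    refine congrArg PySem.Chars.strip ?_
    rw [String.toList_ofList, sanitizeLoop_eq, List.nil_append]
    show (["#", "?"].foldl _ (PySem.Str.strip raw)).toList = _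
    rw [List.foldl_cons, List.foldl_cons, List.foldl_nil]
    rw [stepA_toList _ "?" '?' rfl, stepA_toList _ "#" '#' rfl]
    rw [List.takeWhile_takeWhile]
    have hfun : (fun a => decide ((a != '?') = true ∧ (a != '#') = true)) =
        (fun c : Char => !(("#?".toList).contains c)) := by
      funext a
      rw [show decide ((a != '?') = true ∧ (a != '#') = true) = ((a != '?') && (a != '#')) from by
        cases (a != '?') <;> cases (a != '#') <;> decide]
      exact predChar a
    rw [hfun]
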